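-- pv_equiv track=rewrite | github.com/PGK-13/Red-Book-Agent | backend/app/services/risk_service.py | _find_fuzzy_matches
-- ===== SOURCE A (Python) =====
-- def _find_fuzzy_matches(content: str, keyword: str) -> list[tuple[int, int]]:
--     """Match windows within Levenshtein distance <= 1."""
--
--     keyword_length = len(keyword)
--     if keyword_length == 0:
--         return []
--
--     matches: list[tuple[int, int]] = []
--     seen_windows: set[tuple[int, int]] = set()
--
--     for window_length in {keyword_length - 1, keyword_length, keyword_length + 1}:
--         if window_length <= 0 or window_length > len(content):
--             continue
--
--         for start in range(0, len(content) - window_length + 1):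
--             end = start + window_length
--             candidate = content[start:end]
--             if _levenshtein_distance_at_most_one(candidate, keyword):
--                 window = (start, end)
--                 if window not in seen_windows:
--                     seen_windows.add(window)
--                     matches.append(window)
--
--     matches.sort()
--     return matches
--
-- def _levenshtein_distance_at_most_one(left: str, right: str) -> bool:
--     if left == right:
--         return True
--
--     left_len = len(left)
--     right_len = len(right)
--     if abs(left_len - right_len) > 1:
--         return False
--
--     i = 0
--     j = 0
--     edits = 0
--
--     while i < left_len and j < right_len:
--         if left[i] == right[j]:
--             i += 1
--             j += 1
--             continue
--
--         edits += 1
--         if edits > 1: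
--             return False
--
--         if left_len == right_len:
--             i += 1
--             j += 1
--         elif left_len > right_len:
--             i += 1
--         else:
--             j += 1
--
--     if i < left_len or j < right_len:
--         edits += 1
--
--     return edits <= 1
-- ===== SOURCE B (Python) =====
-- def _find_fuzzy_matches(content: str, keyword: str) -> list[tuple[int, int]]:
--     """Match windows within Levenshtein distance <= 1, via precomputed
--     longest-common-extension arrays over the window-relevant positions:
--     P[s] = lcp(content[s:], keyword) for each feasible window start s,
--     S[e - (m-1)] = longest common suffix of content[:e] and keyword for each
--     feasible window end e.  Each window (s, e) is then accepted by an O(1)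
--     arithmetic test: its edit distance to the keyword is <= 1 iff
--     prefix-match + suffix-match covers all but at most one edited position."""
--
--     m = len(keyword)
--     if m == 0:
--         return []
--
--     n = len(content)
--     # feasible window starts are s <= n - (m - 1); feasible ends are e >= m - 1
--     P = [_lce(content, s, keyword) for s in range(n - m + 2)]
--     rc = content[::-1]
--     rk = keyword[::-1]
--     S = [_lce(rc, n - e, rk) for e in range(m - 1, n + 1)]
--
--     out: list[tuple[int, int]] = []
--     for s in range(n - m + 2):
--         for L in (m - 1, m, m + 1):
--             if L <= 0 or s + L > n:
--                 continue
--             need = m - 1 if L == m else min(L, m)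
--             if min(P[s], L) + min(S[s + L - m + 1], L) >= need:
--                 out.append((s, s + L))
--     return out
--
--
-- def _lce(text: str, start: int, pat: str) -> int:
--     """Length of the longest common prefix of text[start:] and pat."""
--     i = 0
--     while start + i < len(text) and i < len(pat) and text[start + i] == pat[i]:
--         i += 1
--     return i
-- ===== Notes on version B (the rewrite author's own statement) =====
-- stated objective: alternative
-- what changed: B replaces A's per-window edit-simulation check plus seen-set dedup plus final sort by two precomputed longest-common-extension arrays (lcp of every suffix with the keyword, lcs of every prefix with it) and accepts each window with an O(1) arithmetic threshold test (prefix-match + suffix-match must cover all but at most one edited position), emitting results already sorted.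
import Mathlib
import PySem

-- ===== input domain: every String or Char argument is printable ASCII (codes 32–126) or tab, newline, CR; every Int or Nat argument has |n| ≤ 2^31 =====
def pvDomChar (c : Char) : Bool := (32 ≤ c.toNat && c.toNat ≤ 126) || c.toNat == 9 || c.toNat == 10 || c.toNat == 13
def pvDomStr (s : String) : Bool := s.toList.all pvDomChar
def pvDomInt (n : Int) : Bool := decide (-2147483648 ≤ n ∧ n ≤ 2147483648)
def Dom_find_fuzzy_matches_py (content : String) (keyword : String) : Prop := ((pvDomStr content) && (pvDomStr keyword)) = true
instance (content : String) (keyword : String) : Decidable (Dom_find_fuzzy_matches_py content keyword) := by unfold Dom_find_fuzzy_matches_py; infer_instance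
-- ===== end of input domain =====

-- B replaces A's per-window edit simulation + seen-set dedup + final sort by two precomputed
-- longest-common-extension arrays and an O(1) arithmetic threshold test per window (objective: alternative).

-- ===== PORT A =====

-- the 'while i < left_len and j < right_len' loop of _levenshtein_distance_at_most_one,
-- followed by the final 'if i < left_len or j < right_len: edits += 1; return edits <= 1'
def pvLevLoop (w k : List Char) (i j edits : Nat) : Bool :=
  if h : i < w.length ∧ j < k.length then
    if w[i] = k[j] then pvLevLoop w k (i+1) (j+1) edits
    else if edits + 1 > 1 then false
    else if w.length = k.length then pvLevLoop w k (i+1) (j+1) (edits+1)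
    else if k.length < w.length then pvLevLoop w k (i+1) j (edits+1)
    else pvLevLoop w k i (j+1) (edits+1)
  else if i < w.length ∨ j < k.length then decide (edits + 1 ≤ 1) else decide (edits ≤ 1)
termination_by (w.length - i) + (k.length - j)
decreasing_by all_goals omega

def pvLevAtMostOne (w k : List Char) : Bool :=
  if w = k then true
  else if ((w.length : Int) - (k.length : Int)).natAbs > 1 then false
  else pvLevLoop w k 0 0 0

def find_fuzzy_matches_py (content : String) (keyword : String) : List (Int × Int) :=
  let k := keyword.toList
  let m : Int := (k.length : Int)
  if m = 0 then []
  else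
    let c := content.toList
    let n : Int := (c.length : Int)
    let res := (PySem.Set.ofList [m - 1, m, m + 1]).foldl
      (fun (st : List (Int × Int) × PySem.Set (Int × Int)) L =>
        if L ≤ 0 ∨ n < L then st
        else
          (PySem.List.pyRange 0 (n - L + 1) 1).foldl (fun st start =>
            let e := start + L
            let cand := PySem.List.slice c (some start) (some e)
            if pvLevAtMostOne cand k then
              if PySem.Set.contains st.2 (start, e) then st
              else (st.1 ++ [(start, e)], PySem.Set.add st.2 (start, e))
            else st) st)
      ([], PySem.Set.empty)
    PySem.List.sorted2 res.1 (fun p => p.1) (fun p => p.2) false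

-- ===== PORT B =====

-- the 'while start + i < len(text) and i < len(pat) and text[start + i] == pat[i]' loop of _lce
-- (its 'start' argument is always a position in [0, len(text)], hence a Nat)
def pvLce (text : List Char) (start : Nat) (pat : List Char) (i : Nat) : Nat :=
  if h : start + i < text.length ∧ i < pat.length then
    if text[start + i] = pat[i] then pvLce text start pat (i+1) else i
  else i
termination_by pat.length - i
decreasing_by omega

def find_fuzzy_matches_py_alt (content : String) (keyword : String) : List (Int × Int) :=
  let k := keyword.toList
  let m : Int := (k.length : Int)
  if m = 0 then []
  else
    let c := content.toList
    let n : Int := (c.length : Int)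
    -- P[s] = lcp(content[s:], keyword) for the feasible window starts s in [0, n-m+1];
    -- such indices are nonnegative, so .toNat is exact
    let P : List Int := (PySem.List.pyRange 0 (n - m + 2) 1).map (fun s => ((pvLce c s.toNat k 0 : Nat) : Int))
    -- rc = content[::-1], rk = keyword[::-1] (reversal; PySem.List.slice?_none_none_neg_one)
    let rc := c.reverse
    let rk := k.reverse
    -- S[e-(m-1)] = lcp(rc[n-e:], rk) = longest common suffix of content[:e] and keyword,
    -- for the feasible window ends e in [m-1, n]
    let S : List Int := (PySem.List.pyRange (m - 1) (n + 1) 1).map (fun e => ((pvLce rc (n - e).toNat rk 0 : Nat) : Int))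
    (PySem.List.pyRange 0 (n - m + 2) 1).foldl (fun out s =>
      [m - 1, m, m + 1].foldl (fun out L =>
        if L ≤ 0 ∨ n < s + L then out
        else
          let need := if L = m then m - 1 else min L m
          if need ≤ min (PySem.List.pyGetD P s 0) L + min (PySem.List.pyGetD S (s + L - m + 1) 0) L
          then out ++ [(s, s + L)]
          else out) out) []

-- ===== PRECONDITION & SPEC =====
def Spec_find_fuzzy_matches_py (content : String) (keyword : String) (out : List (Int × Int)) : Prop := out = find_fuzzy_matches_py_alt content keyword
instance (content : String) (keyword : String) (out : List (Int × Int)) : Decidable (Spec_find_fuzzy_matches_py content keyword out) := by unfold Spec_find_fuzzy_matches_py; infer_instance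

-- ===== CLAIM (what is proved, stated in full; the proofs are below) =====
def Claim_equal_find_fuzzy_matches_py : Prop := ∀ (content : String) (keyword : String), Dom_find_fuzzy_matches_py content keyword → Spec_find_fuzzy_matches_py content keyword (find_fuzzy_matches_py content keyword)

-- ===== LEMMAS AND PROOFS =====

-- structural longest-common-prefix / -suffix used to characterise both checks
def pvLcp : List Char → List Char → Nat
  | x :: as, y :: bs => if x = y then pvLcp as bs + 1 else 0
  | _, _ => 0

def pvLcs (a b : List Char) : Nat := pvLcp a.reverse b.reverse

lemma pvLcp_nil_left (b : List Char) : pvLcp [] b = 0 := by cases b <;> simp [pvLcp]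

lemma pvLcp_nil_right (a : List Char) : pvLcp a [] = 0 := by cases a <;> simp [pvLcp]

lemma pvLcp_le_left : ∀ (a b : List Char), pvLcp a b ≤ a.length := by
  intro a
  induction a with
  | nil => intro b; simp [pvLcp_nil_left]
  | cons x as ih =>
    intro b
    cases b with
    | nil => simp [pvLcp_nil_right]
    | cons y bs =>
      by_cases h : x = y
      · simp only [pvLcp, if_pos h, List.length_cons]
        exact Nat.succ_le_succ (ih bs)
      · simp [pvLcp, h]

lemma pvLcp_le_right : ∀ (a b : List Char), pvLcp a b ≤ b.length := by
  intro a
  induction a with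
  | nil => intro b; simp [pvLcp_nil_left]
  | cons x as ih =>
    intro b
    cases b with
    | nil => simp [pvLcp_nil_right]
    | cons y bs =>
      by_cases h : x = y
      · simp only [pvLcp, if_pos h, List.length_cons]
        exact Nat.succ_le_succ (ih bs)
      · simp [pvLcp, h]

lemma pvLcs_le_left (a b : List Char) : pvLcs a b ≤ a.length := by
  simpa using pvLcp_le_left a.reverse b.reverse

lemma pvLcs_le_right (a b : List Char) : pvLcs a b ≤ b.length := by
  simpa using pvLcp_le_right a.reverse b.reverse

lemma pvLcp_take : ∀ (a b : List Char) (t : Nat), pvLcp (a.take t) b = min (pvLcp a b) t := by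
  intro a
  induction a with
  | nil => intro b t; simp [pvLcp_nil_left]
  | cons x as ih =>
    intro b t
    cases b with
    | nil => simp [pvLcp_nil_right]
    | cons y bs =>
      cases t with
      | zero => simp [pvLcp_nil_left]
      | succ t =>
        simp only [List.take_succ_cons]
        by_cases h : x = y
        · simp only [pvLcp, if_pos h, ih bs t]
          omega
        · simp [pvLcp, h]

lemma pvLcp_ge_iff (t : Nat) : ∀ (a b : List Char),
    t ≤ pvLcp a b ↔ t ≤ a.length ∧ t ≤ b.length ∧ a.take t = b.take t := by
  induction t with
  | zero => intro a b; simp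
  | succ t ih =>
    intro a b
    cases a with
    | nil => simp [pvLcp_nil_left]
    | cons x as =>
      cases b with
      | nil => simp [pvLcp_nil_right]
      | cons y bs =>
        by_cases h : x = y
        · simp only [pvLcp, if_pos h, List.take_succ_cons, List.length_cons, List.cons_eq_cons]
          constructor
          · intro hle
            have h' := (ih as bs).mp (by omega)
            exact ⟨by omega, by omega, h, h'.2.2⟩
          · rintro ⟨h1, h2, -, h3⟩
            have := (ih as bs).mpr ⟨by omega, by omega, h3⟩
            omega
        · simp [pvLcp, h, List.take_succ_cons]

lemma pvLcs_ge_iff (t : Nat) (a b : List Char) :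
    t ≤ pvLcs a b ↔ t ≤ a.length ∧ t ≤ b.length ∧
      a.drop (a.length - t) = b.drop (b.length - t) := by
  unfold pvLcs
  rw [pvLcp_ge_iff, List.length_reverse, List.length_reverse]
  constructor
  · rintro ⟨h1, h2, h3⟩
    refine ⟨h1, h2, ?_⟩
    have e1 : a.reverse.take t = (a.drop (a.length - t)).reverse := by
      rw [List.reverse_drop]; congr 1; omega
    have e2 : b.reverse.take t = (b.drop (b.length - t)).reverse := by
      rw [List.reverse_drop]; congr 1; omega
    rw [e1, e2] at h3
    exact List.reverse_inj.mp h3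
  · rintro ⟨h1, h2, h3⟩
    refine ⟨h1, h2, ?_⟩
    have e1 : a.reverse.take t = (a.drop (a.length - t)).reverse := by
      rw [List.reverse_drop]; congr 1; omega
    have e2 : b.reverse.take t = (b.drop (b.length - t)).reverse := by
      rw [List.reverse_drop]; congr 1; omega
    rw [e1, e2, h3]

lemma pvLcs_drop (a b : List Char) (s : Nat) :
    pvLcs (a.drop s) b = min (pvLcs a b) (a.length - s) := by
  unfold pvLcs
  rw [List.reverse_drop, pvLcp_take]

-- the _lce while loop computes the structural lcp of the suffixes
lemma pvLce_eq (text : List Char) (start : Nat) (pat : List Char) :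
    ∀ i, pvLce text start pat i = i + pvLcp (text.drop (start + i)) (pat.drop i) := by
  suffices H : ∀ d i, pat.length - i ≤ d →
      pvLce text start pat i = i + pvLcp (text.drop (start + i)) (pat.drop i) from
    fun i => H pat.length i (by omega)
  intro d
  induction d with
  | zero =>
    intro i hi
    rw [pvLce, dif_neg (by omega)]
    rw [List.drop_eq_nil_of_le (show pat.length ≤ i by omega), pvLcp_nil_right]
    omega
  | succ d ih =>
    intro i hi
    by_cases hc : start + i < text.length ∧ i < pat.length
    · rw [pvLce, dif_pos hc]
      by_cases he : text[start + i]'hc.1 = pat[i]'hc.2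
      · rw [if_pos he, ih (i+1) (by omega)]
        rw [List.drop_eq_getElem_cons hc.1, List.drop_eq_getElem_cons hc.2]
        rw [show start + (i+1) = start + i + 1 from by omega]
        simp [pvLcp, he]
        omega
      · rw [if_neg he]
        rw [List.drop_eq_getElem_cons hc.1, List.drop_eq_getElem_cons hc.2]
        simp [pvLcp, he]
    · rw [pvLce, dif_neg hc]
      rcases (by omega : text.length ≤ start + i ∨ pat.length ≤ i) with h | h
      · rw [List.drop_eq_nil_of_le h, pvLcp_nil_left]; omega
      · rw [List.drop_eq_nil_of_le h, pvLcp_nil_right]; omega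

-- the common prefix A's while loop skips over (for relating A's check to pvLcp)
def pvLcpLoop (w k : List Char) (p : Nat) : Nat :=
  if h : p < w.length ∧ p < k.length then
    if w[p] = k[p] then pvLcpLoop w k (p+1) else p
  else p
termination_by w.length - p
decreasing_by omega

lemma pvLcpLoop_eq_aux (a b : List Char) :
    ∀ i, pvLcpLoop a b i = i + pvLcp (a.drop i) (b.drop i) := by
  suffices H : ∀ d i, b.length - i ≤ d →
      pvLcpLoop a b i = i + pvLcp (a.drop i) (b.drop i) from
    fun i => H b.length i (by omega)
  intro d
  induction d with
  | zero =>
    intro i hi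
    rw [pvLcpLoop, dif_neg (by omega)]
    rw [List.drop_eq_nil_of_le (show b.length ≤ i by omega), pvLcp_nil_right]
    omega
  | succ d ih =>
    intro i hi
    by_cases hc : i < a.length ∧ i < b.length
    · rw [pvLcpLoop, dif_pos hc]
      by_cases he : a[i]'hc.1 = b[i]'hc.2
      · rw [if_pos he, ih (i+1) (by omega)]
        rw [List.drop_eq_getElem_cons hc.1, List.drop_eq_getElem_cons hc.2]
        simp [pvLcp, he]
        omega
      · rw [if_neg he]
        rw [List.drop_eq_getElem_cons hc.1, List.drop_eq_getElem_cons hc.2]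
        simp [pvLcp, he]
    · rw [pvLcpLoop, dif_neg hc]
      rcases (by omega : a.length ≤ i ∨ b.length ≤ i) with h | h
      · rw [List.drop_eq_nil_of_le h, pvLcp_nil_left]; omega
      · rw [List.drop_eq_nil_of_le h, pvLcp_nil_right]; omega

lemma pvLcpLoop_eq (a b : List Char) : pvLcpLoop a b 0 = pvLcp a b := by
  simpa using pvLcpLoop_eq_aux a b 0

-- tail comparison after the common prefix: the normal form of A's edit check
def pvCore (w k : List Char) (p : Nat) : Bool :=
  if w.length = k.length then decide (List.drop (p+1) w = List.drop (p+1) k)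
  else if w.length = k.length + 1 then decide (List.drop (p+1) w = List.drop p k)
  else if w.length + 1 = k.length then decide (List.drop p w = List.drop (p+1) k)
  else false

lemma pvLev_eq_case (w k : List Char) (h : w.length = k.length) :
    ∀ i, pvLevLoop w k i i 1 = decide (List.drop i w = List.drop i k) := by
  suffices H : ∀ d i, w.length - i ≤ d → pvLevLoop w k i i 1 = decide (List.drop i w = List.drop i k) from
    fun i => H w.length i (by omega)
  intro d
  induction d with
  | zero =>
    intro i hi
    rw [pvLevLoop]
    have h1 : ¬ (i < w.length ∧ i < k.length) := by omega
    simp [List.drop_eq_nil_of_le (show w.length ≤ i by omega),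
      List.drop_eq_nil_of_le (show k.length ≤ i by omega), show ¬ i < w.length by omega, show ¬ i < k.length by omega]
  | succ d ih =>
    intro i hi
    by_cases hlt : i < w.length
    · rw [pvLevLoop]
      have h1 : i < w.length ∧ i < k.length := by omega
      rw [dif_pos h1]
      by_cases he : w[i] = k[i]
      · rw [if_pos he, ih (i+1) (by omega)]
        have hiff : (List.drop i w = List.drop i k) ↔ (List.drop (i+1) w = List.drop (i+1) k) := by
          rw [List.drop_eq_getElem_cons h1.1, List.drop_eq_getElem_cons h1.2, List.cons_eq_cons]
          simp [he]
        exact (decide_eq_decide.mpr hiff).symm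
      · rw [if_neg he]
        have hne : ¬ (List.drop i w = List.drop i k) := by
          rw [List.drop_eq_getElem_cons h1.1, List.drop_eq_getElem_cons h1.2, List.cons_eq_cons]
          exact fun hc => he hc.1
        simp [hne]
    · rw [pvLevLoop]
      have h1 : ¬ (i < w.length ∧ i < k.length) := by omega
      simp [List.drop_eq_nil_of_le (show w.length ≤ i by omega),
        List.drop_eq_nil_of_le (show k.length ≤ i by omega), show ¬ i < w.length by omega, show ¬ i < k.length by omega]

lemma pvLev_del_case (w k : List Char) (h : w.length = k.length + 1) :
    ∀ j, pvLevLoop w k (j+1) j 1 = decide (List.drop (j+1) w = List.drop j k) := by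
  suffices H : ∀ d j, k.length - j ≤ d → pvLevLoop w k (j+1) j 1 = decide (List.drop (j+1) w = List.drop j k) from
    fun j => H k.length j (by omega)
  intro d
  induction d with
  | zero =>
    intro j hj
    rw [pvLevLoop]
    have h1 : ¬ (j+1 < w.length ∧ j < k.length) := by omega
    simp [List.drop_eq_nil_of_le (show w.length ≤ j+1 by omega),
      List.drop_eq_nil_of_le (show k.length ≤ j by omega), show ¬ j+1 < w.length by omega, show ¬ j < k.length by omega]
  | succ d ih =>
    intro j hj
    by_cases hlt : j < k.length
    · rw [pvLevLoop]
      have h1 : j+1 < w.length ∧ j < k.length := by omega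
      rw [dif_pos h1]
      by_cases he : w[j+1] = k[j]
      · rw [if_pos he, ih (j+1) (by omega)]
        have hiff : (List.drop (j+1) w = List.drop j k) ↔ (List.drop (j+1+1) w = List.drop (j+1) k) := by
          rw [List.drop_eq_getElem_cons h1.1, List.drop_eq_getElem_cons h1.2, List.cons_eq_cons]
          simp [he]
        exact (decide_eq_decide.mpr hiff).symm
      · rw [if_neg he]
        have hne : ¬ (List.drop (j+1) w = List.drop j k) := by
          rw [List.drop_eq_getElem_cons h1.1, List.drop_eq_getElem_cons h1.2, List.cons_eq_cons]
          exact fun hc => he hc.1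
        simp [hne]
    · rw [pvLevLoop]
      have h1 : ¬ (j+1 < w.length ∧ j < k.length) := by omega
      simp [List.drop_eq_nil_of_le (show w.length ≤ j+1 by omega),
        List.drop_eq_nil_of_le (show k.length ≤ j by omega), show ¬ j+1 < w.length by omega, show ¬ j < k.length by omega]

lemma pvLev_ins_case (w k : List Char) (h : w.length + 1 = k.length) :
    ∀ i, pvLevLoop w k i (i+1) 1 = decide (List.drop i w = List.drop (i+1) k) := by
  suffices H : ∀ d i, w.length - i ≤ d → pvLevLoop w k i (i+1) 1 = decide (List.drop i w = List.drop (i+1) k) from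
    fun i => H w.length i (by omega)
  intro d
  induction d with
  | zero =>
    intro i hi
    rw [pvLevLoop]
    have h1 : ¬ (i < w.length ∧ i+1 < k.length) := by omega
    simp [List.drop_eq_nil_of_le (show w.length ≤ i by omega),
      List.drop_eq_nil_of_le (show k.length ≤ i+1 by omega), show ¬ i < w.length by omega, show ¬ i+1 < k.length by omega]
  | succ d ih =>
    intro i hi
    by_cases hlt : i < w.length
    · rw [pvLevLoop]
      have h1 : i < w.length ∧ i+1 < k.length := by omega
      rw [dif_pos h1]
      by_cases he : w[i] = k[i+1]
      · rw [if_pos he, ih (i+1) (by omega)]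
        have hiff : (List.drop i w = List.drop (i+1) k) ↔ (List.drop (i+1) w = List.drop (i+1+1) k) := by
          rw [List.drop_eq_getElem_cons h1.1, List.drop_eq_getElem_cons h1.2, List.cons_eq_cons]
          simp [he]
        exact (decide_eq_decide.mpr hiff).symm
      · rw [if_neg he]
        have hne : ¬ (List.drop i w = List.drop (i+1) k) := by
          rw [List.drop_eq_getElem_cons h1.1, List.drop_eq_getElem_cons h1.2, List.cons_eq_cons]
          exact fun hc => he hc.1
        simp [hne]
    · rw [pvLevLoop]
      have h1 : ¬ (i < w.length ∧ i+1 < k.length) := by omega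
      simp [List.drop_eq_nil_of_le (show w.length ≤ i by omega),
        List.drop_eq_nil_of_le (show k.length ≤ i+1 by omega), show ¬ i < w.length by omega, show ¬ i+1 < k.length by omega]

lemma pvLev_main_end (w k : List Char)
    (hd : w.length = k.length ∨ w.length = k.length + 1 ∨ w.length + 1 = k.length)
    (i : Nat) (hnot : ¬ (i < w.length ∧ i < k.length)) :
    pvLevLoop w k i i 0 = pvCore w k i := by
  rw [pvLevLoop, dif_neg hnot]
  unfold pvCore
  rcases hd with h | h | h
  · have hw : w.length ≤ i := by omega
    simp [h, List.drop_eq_nil_of_le (show w.length ≤ i + 1 by omega),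
      List.drop_eq_nil_of_le (show k.length ≤ i + 1 by omega)]
  · have hk : k.length ≤ i := by omega
    simp [h,
      List.drop_eq_nil_of_le (show w.length ≤ i + 1 by omega),
      List.drop_eq_nil_of_le (show k.length ≤ i by omega)]
  · have hw : w.length ≤ i := by omega
    simp [h, show w.length ≠ k.length by omega, show w.length ≠ k.length + 1 by omega,
      List.drop_eq_nil_of_le (show w.length ≤ i by omega),
      List.drop_eq_nil_of_le (show k.length ≤ i + 1 by omega)]

lemma pvLev_main (w k : List Char)
    (hd : w.length = k.length ∨ w.length = k.length + 1 ∨ w.length + 1 = k.length) :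
    ∀ i, pvLevLoop w k i i 0 = pvCore w k (pvLcpLoop w k i) := by
  suffices H : ∀ d i, (w.length - i) + (k.length - i) ≤ d →
      pvLevLoop w k i i 0 = pvCore w k (pvLcpLoop w k i) from
    fun i => H (w.length + k.length) i (by omega)
  intro d
  induction d with
  | zero =>
    intro i hi
    have hnot : ¬ (i < w.length ∧ i < k.length) := by omega
    rw [pvLcpLoop, dif_neg hnot]
    exact pvLev_main_end w k hd i hnot
  | succ d ih =>
    intro i hi
    by_cases hm : i < w.length ∧ i < k.length
    · by_cases he : w[i]'hm.1 = k[i]'hm.2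
      · rw [pvLevLoop, pvLcpLoop, dif_pos hm, dif_pos hm, if_pos he, if_pos he]
        exact ih (i+1) (by omega)
      · rw [pvLcpLoop, dif_pos hm, if_neg he]
        rw [pvLevLoop, dif_pos hm, if_neg he, if_neg (show ¬ (0 + 1 > 1) by omega)]
        unfold pvCore
        rcases hd with h | h | h
        · rw [if_pos h, if_pos h, pvLev_eq_case w k h (i+1)]
        · rw [if_neg (show ¬ w.length = k.length by omega), if_pos (show k.length < w.length by omega),
            if_neg (show ¬ w.length = k.length by omega), if_pos h, pvLev_del_case w k h i]
        · rw [if_neg (show ¬ w.length = k.length by omega), if_neg (show ¬ k.length < w.length by omega),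
            if_neg (show ¬ w.length = k.length by omega), if_neg (show ¬ w.length = k.length + 1 by omega),
            if_pos h, pvLev_ins_case w k h i]
    · rw [pvLcpLoop, dif_neg hm]
      exact pvLev_main_end w k hd i hm

lemma pvLev_eq_core (w k : List Char) : pvLevAtMostOne w k = pvCore w k (pvLcp w k) := by
  unfold pvLevAtMostOne
  by_cases heq : w = k
  · subst heq
    rw [if_pos rfl]
    unfold pvCore
    simp
  · rw [if_neg heq]
    by_cases hfar : ((w.length : Int) - (k.length : Int)).natAbs > 1
    · rw [if_pos hfar]
      unfold pvCore
      rw [if_neg (by omega), if_neg (by omega), if_neg (by omega)]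
    · rw [if_neg hfar, ← pvLcpLoop_eq]
      exact pvLev_main w k (by omega) 0

-- A's check at the window (s, s+L) equals the lcp/lcs threshold test
lemma pvCore_eq_threshold (w k : List Char)
    (hd : w.length = k.length ∨ w.length = k.length + 1 ∨ w.length + 1 = k.length) :
    pvCore w k (pvLcp w k) =
      decide ((if w.length = k.length then k.length - 1 else min w.length k.length)
        ≤ pvLcp w k + pvLcs w k) := by
  have hp1 : pvLcp w k ≤ w.length := pvLcp_le_left w k
  have hp2 : pvLcp w k ≤ k.length := pvLcp_le_right w k
  have hq1 : pvLcs w k ≤ w.length := pvLcs_le_left w k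
  have hq2 : pvLcs w k ≤ k.length := pvLcs_le_right w k
  rcases hd with h | h | h
  · rw [show (if w.length = k.length then k.length - 1 else min w.length k.length) = k.length - 1 from if_pos h]
    unfold pvCore
    rw [if_pos h, decide_eq_decide]
    by_cases hpm : k.length ≤ pvLcp w k
    · have hnil1 : List.drop (pvLcp w k + 1) w = [] := List.drop_eq_nil_of_le (by omega)
      have hnil2 : List.drop (pvLcp w k + 1) k = [] := List.drop_eq_nil_of_le (by omega)
      rw [hnil1, hnil2]
      constructor
      · intro _; omega
      · intro _; rfl
    · have h6 := pvLcs_ge_iff (k.length - 1 - pvLcp w k) w k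
      rw [show w.length - (k.length - 1 - pvLcp w k) = pvLcp w k + 1 from by omega,
          show k.length - (k.length - 1 - pvLcp w k) = pvLcp w k + 1 from by omega] at h6
      constructor
      · intro hdrop
        have := h6.mpr ⟨by omega, by omega, hdrop⟩
        omega
      · intro hle
        exact (h6.mp (by omega)).2.2
  · rw [show (if w.length = k.length then k.length - 1 else min w.length k.length) = k.length from by
      rw [if_neg (by omega)]; omega]
    unfold pvCore
    rw [if_neg (by omega), if_pos h, decide_eq_decide]
    have h6 := pvLcs_ge_iff (k.length - pvLcp w k) w k
    rw [show w.length - (k.length - pvLcp w k) = pvLcp w k + 1 from by omega,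
        show k.length - (k.length - pvLcp w k) = pvLcp w k from by omega] at h6
    constructor
    · intro hdrop
      have := h6.mpr ⟨by omega, by omega, hdrop⟩
      omega
    · intro hle
      exact (h6.mp (by omega)).2.2
  · rw [show (if w.length = k.length then k.length - 1 else min w.length k.length) = w.length from by
      rw [if_neg (by omega)]; omega]
    unfold pvCore
    rw [if_neg (by omega), if_neg (by omega), if_pos h, decide_eq_decide]
    have h6 := pvLcs_ge_iff (w.length - pvLcp w k) w k
    rw [show w.length - (w.length - pvLcp w k) = pvLcp w k from by omega,
        show k.length - (w.length - pvLcp w k) = pvLcp w k + 1 from by omega] at h6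
    constructor
    · intro hdrop
      have := h6.mpr ⟨by omega, by omega, hdrop⟩
      omega
    · intro hle
      exact (h6.mp (by omega)).2.2

-- ===== top-level machinery =====

def pvChk (c k : List Char) (s L : Int) : Bool :=
  pvLevAtMostOne (PySem.List.slice c (some s) (some (s + L))) k

def pvF (c k : List Char) (s L : Int) : Option (Int × Int) :=
  if 0 < L ∧ s + L ≤ (c.length : Int) ∧ pvChk c k s L = true then some (s, s + L) else none

def pvRowG (c k : List Char) (L : Int) : List (Int × Int) :=
  (PySem.List.pyRange 0 ((c.length : Int) + 1) 1).filterMap (fun s => pvF c k s L)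

def pvBnorm (c k : List Char) : List (Int × Int) :=
  (PySem.List.pyRange 0 ((c.length : Int) + 1) 1).flatMap
    (fun s => [(k.length : Int) - 1, (k.length : Int), (k.length : Int) + 1].filterMap (fun L => pvF c k s L))

def pvRowP (c k : List Char) (L : Int) : List (Int × Int) :=
  if L ≤ 0 ∨ (c.length : Int) < L then []
  else (PySem.List.pyRange 0 ((c.length : Int) - L + 1) 1).filterMap
    (fun s => if pvChk c k s L = true then some (s, s + L) else none)

def pvBodyA (c k : List Char) (st : List (Int × Int) × PySem.Set (Int × Int)) (L : Int) :
    List (Int × Int) × PySem.Set (Int × Int) :=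
  if L ≤ 0 ∨ (c.length : Int) < L then st
  else
    (PySem.List.pyRange 0 ((c.length : Int) - L + 1) 1).foldl (fun st start =>
      let e := start + L
      let cand := PySem.List.slice c (some start) (some e)
      if pvLevAtMostOne cand k then
        if PySem.Set.contains st.2 (start, e) then st
        else (st.1 ++ [(start, e)], PySem.Set.add st.2 (start, e))
      else st) st

def pvPArr (c k : List Char) : List Int :=
  (PySem.List.pyRange 0 ((c.length : Int) - (k.length : Int) + 2) 1).map
    (fun s => ((pvLce c s.toNat k 0 : Nat) : Int))

def pvSArr (c k : List Char) : List Int :=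
  (PySem.List.pyRange ((k.length : Int) - 1) ((c.length : Int) + 1) 1).map
    (fun e => ((pvLce c.reverse ((c.length : Int) - e).toNat k.reverse 0 : Nat) : Int))

def pvBodyB (c k : List Char) (out : List (Int × Int)) (s : Int) : List (Int × Int) :=
  [(k.length : Int) - 1, (k.length : Int), (k.length : Int) + 1].foldl (fun out L =>
    if L ≤ 0 ∨ (c.length : Int) < s + L then out
    else if (if L = (k.length : Int) then (k.length : Int) - 1 else min L (k.length : Int)) ≤
          min (PySem.List.pyGetD (pvPArr c k) s 0) L + min (PySem.List.pyGetD (pvSArr c k) (s + L - (k.length : Int) + 1) 0) L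
      then out ++ [(s, s + L)] else out) out

-- the window (s, s+L) passes B's threshold test iff it passes A's edit check
lemma pv_window (c k : List Char) (s L : Int)
    (hs : 0 ≤ s) (hL0 : 0 < L) (hn : s + L ≤ (c.length : Int))
    (hLm : L = (k.length : Int) - 1 ∨ L = (k.length : Int) ∨ L = (k.length : Int) + 1) :
    ((if L = (k.length : Int) then (k.length : Int) - 1 else min L (k.length : Int)) ≤
       min ((pvLce c s.toNat k 0 : Nat) : Int) L +
       min ((pvLce c.reverse ((c.length : Int) - (s + L)).toNat k.reverse 0 : Nat) : Int) L)
    ↔ pvChk c k s L = true := by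
  obtain ⟨s', rfl⟩ : ∃ t : Nat, s = (t : Int) := ⟨s.toNat, (Int.toNat_of_nonneg hs).symm⟩
  obtain ⟨L', rfl⟩ : ∃ t : Nat, L = (t : Int) := ⟨L.toNat, (Int.toNat_of_nonneg (le_of_lt hL0)).symm⟩
  have hL0' : 0 < L' := by omega
  have he : s' + L' ≤ c.length := by omega
  have hidx : (((c.length : Int)) - ((s' : Int) + (L' : Int))).toNat = c.length - (s' + L') := by omega
  have hw : PySem.List.slice c (some (s' : Int)) (some ((s' : Int) + (L' : Int))) = (c.drop s').take L' :=
    PySem.List.slice_natCast_add c s' L'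
  have hwlen : ((c.drop s').take L').length = L' := by
    simp [List.length_take, List.length_drop]
    omega
  have hchk : pvChk c k (s' : Int) (L' : Int) = pvCore ((c.drop s').take L') k (pvLcp ((c.drop s').take L') k) := by
    unfold pvChk
    rw [hw, pvLev_eq_core]
  have hp : pvLce c ((s' : Int)).toNat k 0 = pvLcp (c.drop s') k := by
    rw [Int.toNat_natCast, pvLce_eq]
    simp
  have hq : pvLce c.reverse (((c.length : Int)) - ((s' : Int) + (L' : Int))).toNat k.reverse 0
      = pvLcp (c.reverse.drop (c.length - (s' + L'))) k.reverse := by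
    rw [hidx, pvLce_eq]
    simp
  have key1 : pvLcp ((c.drop s').take L') k = min (pvLcp (c.drop s') k) L' :=
    pvLcp_take (c.drop s') k L'
  have key2 : pvLcs ((c.drop s').take L') k
      = min (pvLcp (c.reverse.drop (c.length - (s' + L'))) k.reverse) L' := by
    have hweq : (c.drop s').take L' = (c.take (s' + L')).drop s' := by
      rw [List.drop_take]
      congr 1
      omega
    rw [hweq, pvLcs_drop]
    rw [show (c.take (s' + L')).length - s' = L' from by simp [List.length_take]; omega]
    congr 1
    unfold pvLcs
    rw [show (c.take (s' + L')).reverse = c.reverse.drop (c.length - (s' + L')) from by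
      rw [List.reverse_take]]
  have hd : ((c.drop s').take L').length = k.length ∨ ((c.drop s').take L').length = k.length + 1
      ∨ ((c.drop s').take L').length + 1 = k.length := by
    rw [hwlen]; omega
  rw [hchk, pvCore_eq_threshold _ _ hd, decide_eq_true_eq, hp, hq, key1, key2, hwlen]
  split_ifs with h1 h2 h2 <;> omega

lemma pv_getD_map_pyRange (f : Int → Int) (a b i d : Int) (h0 : 0 ≤ i) (h1 : i < b - a) :
    PySem.List.pyGetD ((PySem.List.pyRange a b 1).map f) i d = f (a + i) := by
  obtain ⟨i', rfl⟩ : ∃ t : Nat, i = (t : Int) := ⟨i.toNat, (Int.toNat_of_nonneg h0).symm⟩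
  exact PySem.List.pyGetD_map_pyRange_one f a b i' d (by omega)

lemma pvF_none_of_out (c k : List Char) (s L : Int)
    (h : ¬ (0 < L ∧ s + L ≤ (c.length : Int))) : pvF c k s L = none := by
  unfold pvF
  rw [if_neg (by tauto)]

lemma pv_row_nil (c k : List Char) (s : Int)
    (hs : (c.length : Int) - (k.length : Int) + 2 ≤ s) :
    [(k.length : Int) - 1, (k.length : Int), (k.length : Int) + 1].filterMap
      (fun L => pvF c k s L) = [] := by
  have h1 := pvF_none_of_out c k s ((k.length : Int) - 1) (by omega)
  have h2 := pvF_none_of_out c k s ((k.length : Int)) (by omega)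
  have h3 := pvF_none_of_out c k s ((k.length : Int) + 1) (by omega)
  simp [h1, h2, h3]

lemma pv_stepB (c k : List Char) (s L : Int) (need : Int) (hs : 0 ≤ s)
    (hneed : need = (if L = (k.length : Int) then (k.length : Int) - 1 else min L (k.length : Int)))
    (hLm : L = (k.length : Int) - 1 ∨ L = (k.length : Int) ∨ L = (k.length : Int) + 1)
    (out : List (Int × Int)) :
    (if L ≤ 0 ∨ (c.length : Int) < s + L then out
     else if need ≤
          min (PySem.List.pyGetD (pvPArr c k) s 0) L +
          min (PySem.List.pyGetD (pvSArr c k) (s + L - (k.length : Int) + 1) 0) L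
       then out ++ [(s, s + L)] else out)
    = out ++ (pvF c k s L).toList := by
  subst hneed
  by_cases hg : L ≤ 0 ∨ (c.length : Int) < s + L
  · rw [if_pos hg]
    have : pvF c k s L = none := by unfold pvF; rw [if_neg (by omega)]
    rw [this]
    simp
  · rw [if_neg hg]
    have h1 : PySem.List.pyGetD (pvPArr c k) s 0 = ((pvLce c s.toNat k 0 : Nat) : Int) :=
      PySem.List.pyGetD_map_pyRange_of_nonneg _ _ s 0 hs
        (by rcases hLm with h | h | h <;> omega)
    have h2 : PySem.List.pyGetD (pvSArr c k) (s + L - (k.length : Int) + 1) 0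
        = ((pvLce c.reverse ((c.length : Int) - ((k.length : Int) - 1 + (s + L - (k.length : Int) + 1))).toNat k.reverse 0 : Nat) : Int) :=
      pv_getD_map_pyRange _ _ _ _ 0 (by rcases hLm with h | h | h <;> omega) (by omega)
    rw [show (k.length : Int) - 1 + (s + L - (k.length : Int) + 1) = s + L from by ring] at h2
    rw [h1, h2]
    have hwin := pv_window c k s L hs (by omega) (by omega) hLm
    by_cases hchk : pvChk c k s L = true
    · rw [if_pos (hwin.mpr hchk)]
      have : pvF c k s L = some (s, s + L) := by unfold pvF; rw [if_pos ⟨by omega, by omega, hchk⟩]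
      rw [this]
      rfl
    · rw [if_neg (fun hc => hchk (hwin.mp hc))]
      have : pvF c k s L = none := by
        unfold pvF
        rw [if_neg (by intro hc; exact hchk hc.2.2)]
      rw [this]
      simp

lemma pv_innerB (c k : List Char) (s : Int) (hs : 0 ≤ s) (out : List (Int × Int)) :
    pvBodyB c k out s
      = out ++ ([(k.length : Int) - 1, (k.length : Int), (k.length : Int) + 1].filterMap
          (fun L => pvF c k s L)) := by
  unfold pvBodyB
  simp only [List.foldl_cons, List.foldl_nil, if_true]
  rw [pv_stepB c k s ((k.length : Int) - 1) _ hs rfl (Or.inl rfl) out,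
      pv_stepB c k s ((k.length : Int)) ((k.length : Int) - 1) hs (by simp) (Or.inr (Or.inl rfl)) _,
      pv_stepB c k s ((k.length : Int) + 1) _ hs rfl (Or.inr (Or.inr rfl)) _]
  cases hA : pvF c k s ((k.length : Int) - 1) <;>
    cases hB : pvF c k s ((k.length : Int)) <;>
      cases hC : pvF c k s ((k.length : Int) + 1) <;>
        simp [hA, hB, hC]

lemma pv_outerB (c k : List Char) :
    ∀ (ss : List Int), (∀ s ∈ ss, 0 ≤ s) → ∀ (acc : List (Int × Int)),
      ss.foldl (pvBodyB c k) acc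
      = acc ++ ss.flatMap (fun s =>
          [(k.length : Int) - 1, (k.length : Int), (k.length : Int) + 1].filterMap (fun L => pvF c k s L)) := by
  intro ss
  induction ss with
  | nil => intro _ acc; simp
  | cons s ss ih =>
    intro hmem acc
    rw [List.foldl_cons, pv_innerB c k s (hmem s (by simp)) acc,
      ih (fun x hx => hmem x (by simp [hx])), List.flatMap_cons, List.append_assoc]

lemma pv_B_unfold (content keyword : String) :
    find_fuzzy_matches_py_alt content keyword
      = if (keyword.toList.length : Int) = 0 then [] else pvBnorm content.toList keyword.toList := by
  unfold find_fuzzy_matches_py_alt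
  by_cases h : ((keyword.toList.length : Int) = 0)
  · rw [if_pos h, if_pos h]
  · rw [if_neg h, if_neg h]
    show (PySem.List.pyRange 0 ((content.toList.length : Int) - (keyword.toList.length : Int) + 2) 1).foldl
        (pvBodyB content.toList keyword.toList) [] = _
    rw [pv_outerB content.toList keyword.toList _
      (fun x hx => (PySem.List.mem_pyRange_one.mp hx).1) []]
    unfold pvBnorm
    by_cases hneg : (content.toList.length : Int) - (keyword.toList.length : Int) + 2 ≤ 0
    · rw [PySem.List.pyRange_one_eq_nil hneg]
      simp only [List.flatMap_nil, List.append_nil]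
      symm
      rw [List.flatMap_eq_nil_iff]
      intro s hs'
      exact pv_row_nil _ _ s (by have := PySem.List.mem_pyRange_one.mp hs'; omega)
    · rw [PySem.List.pyRange_one_append 0
        ((content.toList.length : Int) - (keyword.toList.length : Int) + 2)
        ((content.toList.length : Int) + 1) (by omega) (by omega), List.flatMap_append]
      have htail : (PySem.List.pyRange
          ((content.toList.length : Int) - (keyword.toList.length : Int) + 2)
          ((content.toList.length : Int) + 1) 1).flatMap
          (fun s => [(keyword.toList.length : Int) - 1, (keyword.toList.length : Int),
            (keyword.toList.length : Int) + 1].filterMap (fun L => pvF content.toList keyword.toList s L)) = [] := by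
        rw [List.flatMap_eq_nil_iff]
        intro s hs'
        exact pv_row_nil _ _ s (by have := PySem.List.mem_pyRange_one.mp hs'; omega)
      rw [htail, List.append_nil, List.nil_append]

lemma pv_innerA (c k : List Char) (L : Int) :
    ∀ (ss : List Int), ss.Nodup → ∀ (acc : List (Int × Int)) (seen : PySem.Set (Int × Int)),
      seen = acc → (∀ s ∈ ss, ((s, s + L) : Int × Int) ∉ acc) →
      ss.foldl (fun st start =>
        let e := start + L
        let cand := PySem.List.slice c (some start) (some e)
        if pvLevAtMostOne cand k then
          if PySem.Set.contains st.2 (start, e) then st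
          else (st.1 ++ [(start, e)], PySem.Set.add st.2 (start, e))
        else st) (acc, seen)
      = (acc ++ ss.filterMap (fun s => if pvChk c k s L = true then some (s, s + L) else none),
         acc ++ ss.filterMap (fun s => if pvChk c k s L = true then some (s, s + L) else none)) := by
  intro ss
  induction ss with
  | nil => intro _ acc seen hs _; simp [hs]
  | cons s ss ih =>
    intro hnd acc seen hs hfresh
    rw [List.nodup_cons] at hnd
    rw [List.foldl_cons]
    by_cases hchk : pvLevAtMostOne (PySem.List.slice c (some s) (some (s + L))) k = true
    · have hcont : PySem.Set.contains seen (s, s + L) = false := by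
        rw [← Bool.not_eq_true, PySem.Set.contains_iff]
        rw [hs]; exact hfresh s (by simp)
      have hadd : PySem.Set.add seen (s, s + L) = seen ++ [(s, s + L)] := by
        unfold PySem.Set.add; rw [hcont]; simp
      simp only [hchk, if_true, hcont, Bool.false_eq_true, if_false, hadd]
      rw [ih hnd.2 (acc ++ [(s, s + L)]) (seen ++ [(s, s + L)]) (by rw [hs])
        (by intro s' hs' hmem
            rcases List.mem_append.mp hmem with h | h
            · exact hfresh s' (by simp [hs']) h
            · have : s' = s := by simpa using congrArg Prod.fst (List.mem_singleton.mp h)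
              exact hnd.1 (this ▸ hs'))]
      have : pvChk c k s L = true := hchk
      simp [this, List.append_assoc]
    · have : ¬ pvChk c k s L = true := hchk
      simp only [hchk, Bool.false_eq_true, if_false]
      rw [ih hnd.2 acc seen hs (fun s' hs' => hfresh s' (by simp [hs']))]
      simp [this]

lemma pv_stepA (c k : List Char) (L : Int) (acc : List (Int × Int)) (seen : PySem.Set (Int × Int))
    (hs : seen = acc) (hfresh : ∀ s : Int, ((s, s + L) : Int × Int) ∉ acc) :
    pvBodyA c k (acc, seen) L = (acc ++ pvRowP c k L, acc ++ pvRowP c k L) := by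
  unfold pvBodyA pvRowP
  by_cases hg : L ≤ 0 ∨ (c.length : Int) < L
  · simp [hg, hs]
  · rw [if_neg hg, if_neg hg]
    exact pv_innerA c k L _ (PySem.List.nodup_pyRange_one _ _) acc seen hs (fun s _ => hfresh s)

lemma pvRowP_diff (c k : List Char) (L : Int) (x : Int × Int) (hx : x ∈ pvRowP c k L) :
    x.2 = x.1 + L := by
  unfold pvRowP at hx
  split at hx
  · simp at hx
  · rcases List.mem_filterMap.mp hx with ⟨s, _, hsome⟩
    split at hsome
    · cases hsome; rfl
    · cases hsome

lemma pv_resA (c k : List Char) :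
    (PySem.Set.ofList [(k.length : Int) - 1, (k.length : Int), (k.length : Int) + 1]).foldl
        (pvBodyA c k) ([], PySem.Set.empty)
      = (pvRowP c k ((k.length : Int) - 1) ++ pvRowP c k (k.length : Int) ++ pvRowP c k ((k.length : Int) + 1),
         pvRowP c k ((k.length : Int) - 1) ++ pvRowP c k (k.length : Int) ++ pvRowP c k ((k.length : Int) + 1)) := by
  rw [PySem.Set.ofList_eq_self_of_nodup _ (by simp; omega)]
  simp only [List.foldl_cons, List.foldl_nil]
  rw [show (([], PySem.Set.empty) : List (Int × Int) × PySem.Set (Int × Int)) = (([] : List (Int × Int)), ([] : List (Int × Int))) from rfl]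
  rw [pv_stepA c k _ [] [] rfl (by intro s h; simp at h)]
  rw [pv_stepA c k _ _ _ rfl (by
    intro s hmem
    simp only [List.nil_append] at hmem
    have := pvRowP_diff c k _ _ hmem
    omega)]
  rw [pv_stepA c k _ _ _ rfl (by
    intro s hmem
    simp only [List.nil_append] at hmem
    rcases List.mem_append.mp hmem with h | h
    · have := pvRowP_diff c k _ _ h; omega
    · have := pvRowP_diff c k _ _ h; omega)]
  simp [List.append_assoc]

lemma pv_A_unfold (content keyword : String) :
    find_fuzzy_matches_py content keyword
      = if (keyword.toList.length : Int) = 0 then []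
        else PySem.List.sorted2
          (pvRowP content.toList keyword.toList ((keyword.toList.length : Int) - 1)
            ++ pvRowP content.toList keyword.toList (keyword.toList.length : Int)
            ++ pvRowP content.toList keyword.toList ((keyword.toList.length : Int) + 1))
          (fun p => p.1) (fun p => p.2) false := by
  unfold find_fuzzy_matches_py
  by_cases h : ((keyword.toList.length : Int) = 0)
  · rw [if_pos h, if_pos h]
  · rw [if_neg h, if_neg h]
    show PySem.List.sorted2
        ((PySem.Set.ofList [(keyword.toList.length : Int) - 1, (keyword.toList.length : Int),
            (keyword.toList.length : Int) + 1]).foldl (pvBodyA content.toList keyword.toList)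
          ([], PySem.Set.empty)).1 (fun p => p.1) (fun p => p.2) false = _
    rw [pv_resA]

lemma pvF_some (c k : List Char) (s L : Int) (x : Int × Int) (h : pvF c k s L = some x) :
    x = (s, s + L) := by
  unfold pvF at h
  split at h
  · cases h; rfl
  · cases h

lemma pvRowP_eq_rowG (c k : List Char) (L : Int) : pvRowP c k L = pvRowG c k L := by
  unfold pvRowP pvRowG
  by_cases hg : L ≤ 0 ∨ (c.length : Int) < L
  · rw [if_pos hg]
    symm
    rw [List.filterMap_eq_nil_iff]
    intro s hs
    have hs' := PySem.List.mem_pyRange_one.mp hs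
    unfold pvF
    rw [if_neg (by omega)]
  · rw [if_neg hg]
    rw [PySem.List.pyRange_one_append 0 ((c.length : Int) - L + 1) ((c.length : Int) + 1) (by omega) (by omega),
      List.filterMap_append]
    have h2 : (PySem.List.pyRange ((c.length : Int) - L + 1) ((c.length : Int) + 1) 1).filterMap
        (fun s => pvF c k s L) = [] := by
      rw [List.filterMap_eq_nil_iff]
      intro s hs
      have hs' := PySem.List.mem_pyRange_one.mp hs
      unfold pvF
      rw [if_neg (by omega)]
    rw [h2, List.append_nil]
    apply List.filterMap_congr
    intro s hs
    have hs' := PySem.List.mem_pyRange_one.mp hs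
    unfold pvF
    by_cases hc : pvChk c k s L = true
    · rw [if_pos hc, if_pos ⟨by omega, by omega, hc⟩]
    · rw [if_neg hc, if_neg (by tauto)]

lemma pv_filterMap_eq_flatMap {α β : Type} (f : α → Option β) (l : List α) :
    l.filterMap f = l.flatMap (fun a => (f a).toList) := by
  induction l with
  | nil => simp
  | cons a l ih => cases hfa : f a <;> simp [hfa, ih]

lemma pv_flatMap_append_perm {α β : Type} (ys : List α) (u v : α → List β) :
    (ys.flatMap fun b => u b ++ v b).Perm (ys.flatMap u ++ ys.flatMap v) := by
  induction ys with
  | nil => simp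
  | cons b ys ih =>
    simp only [List.flatMap_cons, List.append_assoc]
    refine List.Perm.append_left (u b) ?_
    refine (List.Perm.append_left (v b) ih).trans ?_
    rw [← List.append_assoc, ← List.append_assoc]
    exact List.Perm.append_right _ List.perm_append_comm

lemma pv_flatMap_comm {α β γ : Type} (xs : List α) (ys : List β) (f : α → β → List γ) :
    (xs.flatMap fun a => ys.flatMap fun b => f a b).Perm
      (ys.flatMap fun b => xs.flatMap fun a => f a b) := by
  induction xs with
  | nil => simp
  | cons a xs ih =>
    simp only [List.flatMap_cons]
    refine (List.Perm.append_left _ ih).trans ?_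
    exact (pv_flatMap_append_perm ys (fun b => f a b) (fun b => xs.flatMap fun a => f a b)).symm

lemma pv_perm (c k : List Char) :
    (pvBnorm c k).Perm
      (pvRowG c k ((k.length : Int) - 1) ++ pvRowG c k (k.length : Int)
        ++ pvRowG c k ((k.length : Int) + 1)) := by
  unfold pvBnorm pvRowG
  simp only [pv_filterMap_eq_flatMap]
  refine (pv_flatMap_comm (PySem.List.pyRange 0 ((c.length : Int) + 1) 1)
    [(k.length : Int) - 1, (k.length : Int), (k.length : Int) + 1]
    (fun s L => (pvF c k s L).toList)).symm.symm.trans ?_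
  rw [show ([(k.length : Int) - 1, (k.length : Int), (k.length : Int) + 1].flatMap fun L =>
      (PySem.List.pyRange 0 ((c.length : Int) + 1) 1).flatMap fun s => (pvF c k s L).toList)
    = ((PySem.List.pyRange 0 ((c.length : Int) + 1) 1).flatMap fun s => (pvF c k s ((k.length : Int) - 1)).toList)
      ++ ((PySem.List.pyRange 0 ((c.length : Int) + 1) 1).flatMap fun s => (pvF c k s (k.length : Int)).toList)
      ++ ((PySem.List.pyRange 0 ((c.length : Int) + 1) 1).flatMap fun s => (pvF c k s ((k.length : Int) + 1)).toList)
    from by simp [List.append_assoc]]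

lemma pv_pairB (c k : List Char) :
    (pvBnorm c k).Pairwise (fun a b => (toLex a : Lex (Int × Int)) < toLex b) := by
  unfold pvBnorm
  rw [List.pairwise_flatMap]
  constructor
  · intro s _
    rw [List.pairwise_filterMap]
    have h3 : List.Pairwise (· < ·) [(k.length : Int) - 1, (k.length : Int), (k.length : Int) + 1] := by
      simp [List.pairwise_cons]
    refine h3.imp ?_
    intro L1 L2 hlt b hb b' hb'
    have e1 := pvF_some c k s L1 b hb
    have e2 := pvF_some c k s L2 b' hb'
    subst e1; subst e2
    rw [Prod.Lex.toLex_lt_toLex]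
    exact Or.inr ⟨rfl, by omega⟩
  · refine (PySem.List.pairwise_lt_pyRange_one _ _).imp ?_
    intro s1 s2 hlt x hx y hy
    rcases List.mem_filterMap.mp hx with ⟨L1, _, h1⟩
    rcases List.mem_filterMap.mp hy with ⟨L2, _, h2⟩
    have e1 := pvF_some c k s1 L1 x h1
    have e2 := pvF_some c k s2 L2 y h2
    subst e1; subst e2
    rw [Prod.Lex.toLex_lt_toLex]
    exact Or.inl hlt

lemma pv_sorted2_lex (xs : List (Int × Int)) :
    PySem.List.sorted2 xs (fun p => p.1) (fun p => p.2) false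
      = PySem.List.sorted xs (fun p => (toLex p : Lex (Int × Int))) false := by
  unfold PySem.List.sorted2 PySem.List.sorted
  simp only [Bool.false_eq_true, if_false]
  congr 1
  funext acc x
  congr 1
  funext a b
  rcases lt_trichotomy a.1 b.1 with hlt | heq | hgt
  · have h2 : ¬ b.1 < a.1 := by omega
    simp [hlt, h2, Prod.Lex.toLex_lt_toLex]
  · have h1 : ¬ a.1 < b.1 := by omega
    have h2 : ¬ b.1 < a.1 := by omega
    simp [heq, Prod.Lex.toLex_lt_toLex]
  · have h1 : ¬ a.1 < b.1 := by omega
    have h3 : a.1 ≠ b.1 := by omega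
    have h2 : b.1 < a.1 := hgt
    simp [h1, h2, h3, Prod.Lex.toLex_lt_toLex]

theorem pv_top (content keyword : String) :
    find_fuzzy_matches_py content keyword = find_fuzzy_matches_py_alt content keyword := by
  rw [pv_A_unfold, pv_B_unfold]
  by_cases h : ((keyword.toList.length : Int) = 0)
  · rw [if_pos h, if_pos h]
  · rw [if_neg h, if_neg h]
    rw [pvRowP_eq_rowG, pvRowP_eq_rowG, pvRowP_eq_rowG, pv_sorted2_lex]
    exact PySem.List.sorted_eq_of_perm_of_pairwise_lt _ _ _
      (pv_perm content.toList keyword.toList) (pv_pairB content.toList keyword.toList)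

-- ===== VERDICT (by name: the statement is the Claim_ definition above) =====
theorem find_fuzzy_matches_py_spec : Claim_equal_find_fuzzy_matches_py :=
  fun content keyword _ => pv_top content keyword
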